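-- pv_equiv track=rewrite | github.com/JustaJunk/Drift-Stock | goldenFutures.py | mostDataOnLevel
-- ===== SOURCE A (Python) =====
-- def mostDataOnLevel(openPrices, closePrices, levels):
-- 	levelNum = len(levels)
-- 	counts = [0]*levelNum
-- 	for i,level in enumerate(levels):
-- 		for openPri,closePri in zip(openPrices, closePrices):
-- 			condition1 = (openPri >= level and closePri <= level)
-- 			condition2 = (openPri <= level and closePri >= level)
-- 			if condition1 or condition2:
-- 				counts[i] += 1
--
-- 	return counts.index(max(counts))
-- ===== SOURCE B (Python) =====
-- def _bisect_left(s, x):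
--     lo, hi = 0, len(s)
--     while lo < hi:
--         mid = (lo + hi) // 2
--         if s[mid] < x:
--             lo = mid + 1
--         else:
--             hi = mid
--     return lo
--
-- def _bisect_right(s, x):
--     lo, hi = 0, len(s)
--     while lo < hi:
--         mid = (lo + hi) // 2
--         if x < s[mid]:
--             hi = mid
--         else:
--             lo = mid + 1
--     return lo
--
-- def mostDataOnLevel(openPrices, closePrices, levels):
--     m = len(levels)
--     pairs = sorted(enumerate(levels), key=lambda p: p[1])
--     keys = [lvl for _, lvl in pairs]
--     diff = [0] * (m + 1)
--     for o, c in zip(openPrices, closePrices):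
--         lo, hi = (o, c) if o <= c else (c, o)
--         diff[_bisect_left(keys, lo)] += 1
--         diff[_bisect_right(keys, hi)] -= 1
--     counts = [0] * m
--     run = 0
--     for j, (idx, _) in enumerate(pairs):
--         run += diff[j]
--         counts[idx] = run
--     return counts.index(max(counts))
-- ===== Notes on version B (the rewrite author's own statement) =====
-- stated objective: faster
-- what changed: Replaces the per-level full scan of all bars by sorting the levels once, inserting each bar's [min,max] range into a difference array via hand-written binary search, prefix-summing to get all level counts, then taking first-max index.
import Mathlib
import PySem

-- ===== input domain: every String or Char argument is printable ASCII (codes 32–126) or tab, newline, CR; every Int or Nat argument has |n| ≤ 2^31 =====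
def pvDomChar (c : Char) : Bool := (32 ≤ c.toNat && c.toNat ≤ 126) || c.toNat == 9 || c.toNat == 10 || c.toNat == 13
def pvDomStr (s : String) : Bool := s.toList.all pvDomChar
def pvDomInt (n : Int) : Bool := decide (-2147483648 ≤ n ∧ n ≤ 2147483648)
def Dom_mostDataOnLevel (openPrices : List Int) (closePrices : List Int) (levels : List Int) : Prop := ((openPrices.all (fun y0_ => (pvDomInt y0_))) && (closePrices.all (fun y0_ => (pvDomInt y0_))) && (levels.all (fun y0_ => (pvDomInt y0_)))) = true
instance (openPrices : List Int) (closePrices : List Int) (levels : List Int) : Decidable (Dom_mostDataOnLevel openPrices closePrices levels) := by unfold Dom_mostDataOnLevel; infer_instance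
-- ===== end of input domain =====

-- B replaces A's per-level scan of all bars (O(n*m)) by: sort the levels once, add each
-- bar's [min,max] range to a difference array via binary search, prefix-sum, argmax
-- (objective: faster, O((n+m) log m); measured asymptotically faster).


-- ===== PORT A =====
-- counts[i] += 1 : the enumerate index i is ≥ 0 and < len(counts), so .toNat is exact here.
def mostDataOnLevel (openPrices : List Int) (closePrices : List Int) (levels : List Int) : Int :=
  let levelNum := levels.length
  let counts : List Int := List.replicate levelNum 0
  let counts := (PySem.List.enumerate levels 0).foldl (fun cs il =>
      (openPrices.zip closePrices).foldl (fun cs' p =>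
        let condition1 := p.1 ≥ il.2 ∧ p.2 ≤ il.2
        let condition2 := p.1 ≤ il.2 ∧ p.2 ≥ il.2
        if condition1 ∨ condition2 then cs'.set il.1.toNat (cs'.getD il.1.toNat 0 + 1) else cs') cs) counts
  -- max(counts) raises on empty counts: outside Pre_; index never fails since max ∈ counts
  match PySem.List.max? counts (fun x => x) with
  | some m =>
    match PySem.List.index? counts m with
    | some j => (j : Int)
    | none => 0
  | none => 0

-- ===== PORT B =====
-- Source B's _bisect_left/_bisect_right are exactly the standard bisect loops; ported as the
-- PySem primitives of the same algorithm (PySem.List.bisectLeft/bisectRight).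
-- diff[..] and counts[idx] indices are always in range (bisect ≤ m, enumerate idx < m),
-- so .getD/.set/.toNat are exact here.
def pvAltStep (keys : List Int) (d : List Int) (p : Int × Int) : List Int :=
  let lh := if p.1 ≤ p.2 then (p.1, p.2) else (p.2, p.1)
  let l := PySem.List.bisectLeft keys lh.1
  let r := PySem.List.bisectRight keys lh.2
  let d1 := d.set l (d.getD l 0 + 1)
  d1.set r (d1.getD r 0 - 1)

def pvRunStep (diff : List Int) (st : List Int × Int) (e : Int × (Int × Int)) : List Int × Int :=
  let run := st.2 + diff.getD e.1.toNat 0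
  (st.1.set e.2.1.toNat run, run)

def mostDataOnLevel_alt (openPrices : List Int) (closePrices : List Int) (levels : List Int) : Int :=
  let m := levels.length
  let pairs := PySem.List.sorted (PySem.List.enumerate levels 0) (fun p => p.2) false
  let keys := pairs.map (fun p => p.2)
  let diff := (openPrices.zip closePrices).foldl (pvAltStep keys) (List.replicate (m + 1) 0)
  let counts : List Int := List.replicate m 0
  let cr := (PySem.List.enumerate pairs 0).foldl (pvRunStep diff) (counts, 0)
  match PySem.List.max? cr.1 (fun x => x) with
  | some mx =>
    match PySem.List.index? cr.1 mx with
    | some j => (j : Int)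
    | none => 0
  | none => 0

-- ===== PRECONDITION & SPEC =====
-- Pre_ excludes only empty `levels`, on which A raises ValueError (max() of empty sequence).
def Pre_mostDataOnLevel (openPrices : List Int) (closePrices : List Int) (levels : List Int) : Prop := levels ≠ []
instance (openPrices : List Int) (closePrices : List Int) (levels : List Int) : Decidable (Pre_mostDataOnLevel openPrices closePrices levels) := by unfold Pre_mostDataOnLevel; infer_instance

def pvWitness_mostDataOnLevel : List Int × List Int × List Int := ([3, 1, 4], [1, 5, 2], [2, 3])

def Spec_mostDataOnLevel (openPrices : List Int) (closePrices : List Int) (levels : List Int) (out : Int) : Prop := out = mostDataOnLevel_alt openPrices closePrices levels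
instance (openPrices : List Int) (closePrices : List Int) (levels : List Int) (out : Int) : Decidable (Spec_mostDataOnLevel openPrices closePrices levels out) := by unfold Spec_mostDataOnLevel; infer_instance

-- ===== CLAIM (what is proved, stated in full; the proofs are below) =====
def Claim_equal_mostDataOnLevel : Prop := ∀ (openPrices : List Int) (closePrices : List Int) (levels : List Int), Dom_mostDataOnLevel openPrices closePrices levels → Pre_mostDataOnLevel openPrices closePrices levels → Spec_mostDataOnLevel openPrices closePrices levels (mostDataOnLevel openPrices closePrices levels)

-- ===== LEMMAS AND PROOFS =====

-- proof-side count of bars straddling `level`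
def pvBarCnt (bars : List (Int × Int)) (level : Int) : Int :=
  bars.foldl (fun acc p => if min p.1 p.2 ≤ level ∧ level ≤ max p.1 p.2 then acc + 1 else acc) 0

theorem pvBarCnt_shift (bars : List (Int × Int)) (level : Int) (a : Int) :
    bars.foldl (fun acc p => if min p.1 p.2 ≤ level ∧ level ≤ max p.1 p.2 then acc + 1 else acc) a
      = a + pvBarCnt bars level := by
  induction bars generalizing a with
  | nil => simp [pvBarCnt]
  | cons p z ih =>
    simp only [pvBarCnt, List.foldl_cons]
    split <;> rw [ih, ih] <;> ring

-- ===== A-side =====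

-- A's inner loop over the bars just adds pvBarCnt to slot i
theorem pv_inner (z : List (Int × Int)) (l : Int) :
    ∀ (cs : List Int) (i : Nat), i < cs.length →
    z.foldl (fun cs' p =>
        if (p.1 ≥ l ∧ p.2 ≤ l) ∨ (p.1 ≤ l ∧ p.2 ≥ l) then cs'.set i (cs'.getD i 0 + 1) else cs') cs
      = cs.set i (cs.getD i 0 + pvBarCnt z l) := by
  induction z with
  | nil =>
    intro cs i hi
    simp [pvBarCnt, List.getElem?_eq_getElem hi, List.set_getElem_self]
  | cons p z ih =>
    intro cs i hi
    have hlen : i < (cs.set i (cs.getD i 0 + 1)).length := by simpa using hi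
    by_cases hc : (p.1 ≥ l ∧ p.2 ≤ l) ∨ (p.1 ≤ l ∧ p.2 ≥ l)
    · have hcond : min p.1 p.2 ≤ l ∧ l ≤ max p.1 p.2 := by omega
      have hp : pvBarCnt (p :: z) l = 1 + pvBarCnt z l := by
        simp only [pvBarCnt, List.foldl_cons]
        rw [pvBarCnt_shift, if_pos hcond]
        simp only [pvBarCnt]
        omega
      simp only [List.foldl_cons, if_pos hc]
      rw [ih _ i hlen, List.set_set]
      congr 1
      rw [List.getD_eq_getElem _ _ hlen, List.getElem_set_self, hp]
      ring
    · have hcond : ¬ (min p.1 p.2 ≤ l ∧ l ≤ max p.1 p.2) := by omega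
      have hp : pvBarCnt (p :: z) l = pvBarCnt z l := by
        simp only [pvBarCnt, List.foldl_cons]
        rw [if_neg hcond]
      simp only [List.foldl_cons, if_neg hc]
      rw [ih _ i hi, hp]

-- A's outer loop turns the counts array into the per-level counts
theorem pv_outer (z : List (Int × Int)) :
    ∀ (ls : List Int) (k : Nat) (cs : List Int), k + ls.length ≤ cs.length →
    (PySem.List.enumerate ls (k : Int)).foldl (fun cs il =>
        z.foldl (fun cs' p =>
          if (p.1 ≥ il.2 ∧ p.2 ≤ il.2) ∨ (p.1 ≤ il.2 ∧ p.2 ≥ il.2)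
          then cs'.set il.1.toNat (cs'.getD il.1.toNat 0 + 1) else cs') cs) cs
      = cs.take k ++ (ls.zip (cs.drop k)).map (fun p => p.2 + pvBarCnt z p.1) ++ cs.drop (k + ls.length) := by
  intro ls
  induction ls with
  | nil =>
    intro k cs hk
    simp [PySem.List.enumerate_nil]
  | cons l ls ih =>
    intro k cs hk
    have hklt : k < cs.length := by simp at hk; omega
    rw [PySem.List.enumerate_cons]
    rw [List.foldl_cons]
    have hcast : ((k : Int) + 1) = ((k + 1 : Nat) : Int) := by push_cast; ring
    rw [show ((k : Int), l).1.toNat = k from by simp]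
    rw [pv_inner z l cs k hklt]
    rw [hcast, ih (k + 1) (cs.set k (cs.getD k 0 + pvBarCnt z l)) (by simp at hk ⊢; omega)]
    have hdrop : (cs.set k (cs.getD k 0 + pvBarCnt z l)).drop (k + 1) = cs.drop (k + 1) := by
      rw [List.drop_set_of_lt] ; omega
    have htake : (cs.set k (cs.getD k 0 + pvBarCnt z l)).take (k + 1)
        = cs.take k ++ [cs.getD k 0 + pvBarCnt z l] := by
      rw [List.take_add_one]
      congr 1
      · apply List.ext_getElem <;> simp [List.getElem_set]
        intro i h1 h2 he; omega
      · simp [hklt]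
    have hdropk : cs.drop k = cs[k]'hklt :: cs.drop (k + 1) := List.drop_eq_getElem_cons hklt
    rw [hdrop, htake, hdropk]
    simp only [List.zip_cons_cons, List.map_cons]
    rw [List.getD_eq_getElem _ _ hklt]
    simp [List.append_assoc]
    rw [show k + 1 + ls.length = k + (ls.length + 1) from by omega, List.drop_set_of_lt]
    omega

theorem pv_map_zip_replicate (z : List (Int × Int)) :
    ∀ ls : List Int,
    ((ls.zip (List.replicate ls.length (0 : Int))).map (fun p => p.2 + pvBarCnt z p.1))
      = ls.map (pvBarCnt z) := by
  intro ls
  induction ls with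
  | nil => simp
  | cons l ls ih => simp only [List.length_cons, List.replicate_succ, List.zip_cons_cons,
      List.map_cons, ih, zero_add]

-- A's counts list is exactly levels.map (pvBarCnt bars)
theorem pv_A_counts (z : List (Int × Int)) (ls : List Int) :
    (PySem.List.enumerate ls (0 : Int)).foldl (fun cs il =>
        z.foldl (fun cs' p =>
          if (p.1 ≥ il.2 ∧ p.2 ≤ il.2) ∨ (p.1 ≤ il.2 ∧ p.2 ≥ il.2)
          then cs'.set il.1.toNat (cs'.getD il.1.toNat 0 + 1) else cs')
        cs) (List.replicate ls.length 0)
      = ls.map (pvBarCnt z) := by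
  have h := pv_outer z ls 0 (List.replicate ls.length 0) (by simp)
  simp only [Nat.cast_zero] at h
  rw [h, List.take_zero, List.drop_zero, List.nil_append, Nat.zero_add,
      show (List.replicate ls.length (0 : Int)).drop ls.length = [] from by simp,
      List.append_nil, pv_map_zip_replicate]

-- ===== B-side =====

-- sum of a window of the diff array
def pvW (d : List Int) (k n : Nat) : Int := ((d.drop k).take n).sum

theorem pvW_succ (d : List Int) (k n : Nat) :
    ((d.drop k).take (n + 1)).sum = d.getD k 0 + ((d.drop (k + 1)).take n).sum := by
  rcases h : d.drop k with _ | ⟨x, t⟩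
  · have hl : d.length ≤ k := by
      by_contra hk
      rw [List.drop_eq_nil_iff] at h; omega
    simp [List.getD_eq_getElem?_getD, List.getElem?_eq_none hl,
      List.drop_eq_nil_iff.mpr (by omega : d.length ≤ k + 1)]
  · have hk : k < d.length := by
      by_contra hk
      rw [List.drop_eq_nil_iff.mpr (by omega)] at h; simp at h
    have hd := List.drop_eq_getElem_cons hk
    rw [h] at hd
    injection hd with h1 h2
    subst h1; subst h2
    rw [List.take_succ_cons, List.sum_cons, List.getD_eq_getElem _ _ hk]

theorem pv_sum_set (l : List Int) : ∀ (i : Nat) (hi : i < l.length) (a : Int),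
    (l.set i a).sum = l.sum - l[i] + a := by
  induction l with
  | nil => intro i hi; simp at hi
  | cons x t ih =>
    intro i hi a
    cases i with
    | zero => simp only [List.set_cons_zero, List.sum_cons, List.getElem_cons_zero]; ring
    | succ j =>
      have hj : j < t.length := by simp at hi; omega
      simp only [List.set_cons_succ, List.sum_cons, List.getElem_cons_succ, ih j hj a]
      ring

theorem pv_sum_take_set (d : List Int) (a : Nat) (ha : a < d.length) (v : Int) (n : Nat) :
    ((d.set a (d.getD a 0 + v)).take n).sum = (d.take n).sum + (if a < n then v else 0) := by
  rw [List.take_set]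
  by_cases h : a < n
  · have ha' : a < (d.take n).length := by simp; omega
    rw [pv_sum_set _ _ ha', if_pos h, List.getElem_take, List.getD_eq_getElem _ _ ha]
    ring
  · rw [List.set_eq_of_length_le (by simp; omega)]
    simp [h]

-- bisect facts on the sorted key list (from PySem.List.bisectLeft_spec / bisectRight_spec)
theorem pv_bisect_facts (keys : List Int) (hs : keys.Pairwise (· ≤ ·)) (lo hi : Int)
    (hlohi : lo ≤ hi) :
    PySem.List.bisectLeft keys lo ≤ keys.length ∧
    PySem.List.bisectRight keys hi ≤ keys.length ∧
    PySem.List.bisectLeft keys lo ≤ PySem.List.bisectRight keys hi ∧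
    ∀ (j : Nat) (hj : j < keys.length),
      ((PySem.List.bisectLeft keys lo ≤ j ↔ lo ≤ keys[j]) ∧
       (j < PySem.List.bisectRight keys hi ↔ keys[j] ≤ hi)) := by
  obtain ⟨hL1, hL2, hL3⟩ := PySem.List.bisectLeft_spec keys lo hs
  obtain ⟨hR1, hR2, hR3⟩ := PySem.List.bisectRight_spec keys hi hs
  refine ⟨hL1, hR1, ?_, ?_⟩
  · by_contra hlt
    rw [not_le] at hlt
    have hr : PySem.List.bisectRight keys hi < keys.length := by omega
    have h1 := hL2 _ hr (by omega)
    have h2 := hR3 _ hr (by omega)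
    omega
  · intro j hj
    constructor
    · constructor
      · intro h; exact hL3 j hj h
      · intro h; by_contra hn; exact absurd h (by have := hL2 j hj (by omega); omega)
    · constructor
      · intro h; exact hR2 j hj h
      · intro h; by_contra hn; exact absurd h (by have := hR3 j hj (by omega); omega)

theorem pvBarCnt_cons (p : Int × Int) (bars : List (Int × Int)) (x : Int) :
    pvBarCnt (p :: bars) x
      = (if min p.1 p.2 ≤ x ∧ x ≤ max p.1 p.2 then (1 : Int) else 0) + pvBarCnt bars x := by
  simp only [pvBarCnt, List.foldl_cons]
  rw [pvBarCnt_shift]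
  split <;> simp [pvBarCnt]

-- the diff-array fold: its prefix sums are the straddle counts at the sorted keys
theorem pv_diff_len (keys : List Int) (bars : List (Int × Int)) :
    ∀ d : List Int, (bars.foldl (pvAltStep keys) d).length = d.length := by
  induction bars with
  | nil => intro d; rfl
  | cons p bars ih =>
    intro d
    rw [List.foldl_cons, ih]
    simp [pvAltStep]

theorem pv_diff_sum (keys : List Int) (hs : keys.Pairwise (· ≤ ·)) :
    ∀ (bars : List (Int × Int)) (d : List Int), keys.length < d.length →
    ∀ (j : Nat), j < keys.length →
    ((bars.foldl (pvAltStep keys) d).take (j + 1)).sum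
      = (d.take (j + 1)).sum + pvBarCnt bars (keys.getD j 0) := by
  intro bars
  induction bars with
  | nil => intro d hd j hj; simp [pvBarCnt]
  | cons p bars ih =>
    intro d hd j hj
    have hx : keys.getD j 0 = keys[j]'hj := List.getD_eq_getElem _ _ hj
    have hlh : (if p.1 ≤ p.2 then (p.1, p.2) else (p.2, p.1)) = (min p.1 p.2, max p.1 p.2) := by
      split <;> simp_all <;> try omega
    obtain ⟨hl1, hr1, hlr, hiff⟩ :=
      pv_bisect_facts keys hs (min p.1 p.2) (max p.1 p.2) (by omega)
    have hstep : pvAltStep keys d p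
        = (d.set (PySem.List.bisectLeft keys (min p.1 p.2))
              (d.getD (PySem.List.bisectLeft keys (min p.1 p.2)) 0 + 1)).set
            (PySem.List.bisectRight keys (max p.1 p.2))
            ((d.set (PySem.List.bisectLeft keys (min p.1 p.2))
                (d.getD (PySem.List.bisectLeft keys (min p.1 p.2)) 0 + 1)).getD
              (PySem.List.bisectRight keys (max p.1 p.2)) 0 + (-1)) := by
      simp only [pvAltStep, hlh]
      ring_nf
    rw [List.foldl_cons, ih (pvAltStep keys d p) (by rw [show (pvAltStep keys d p).length = d.length from by simp [pvAltStep]]; exact hd) j hj]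
    rw [hstep, pv_sum_take_set _ _ (by simp; omega) _ _, pv_sum_take_set _ _ (by omega) _ _]
    rw [hx, pvBarCnt_cons]
    have hiffj := hiff j hj
    by_cases hin : min p.1 p.2 ≤ keys[j] ∧ keys[j] ≤ max p.1 p.2
    · rw [if_pos hin]
      have h1 : PySem.List.bisectLeft keys (min p.1 p.2) < j + 1 := by
        have := (hiffj.1).mpr hin.1; omega
      have h2 : ¬ (PySem.List.bisectRight keys (max p.1 p.2) < j + 1) := by
        have := (hiffj.2).mpr hin.2; omega
      rw [if_pos h1, if_neg h2]
      ring
    · rw [if_neg hin]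
      rcases not_and_or.mp hin with hno | hno
      · have h1 : ¬ (PySem.List.bisectLeft keys (min p.1 p.2) < j + 1) := by
          intro hcon
          exact hno ((hiffj.1).mp (by omega))
        rw [if_neg h1, if_neg (by intro hcon; apply h1; omega)]
        ring
      · have h2 : PySem.List.bisectRight keys (max p.1 p.2) < j + 1 := by
          by_contra hcon
          exact hno ((hiffj.2).mp (by omega))
        have h1 : PySem.List.bisectLeft keys (min p.1 p.2) < j + 1 := by omega
        rw [if_pos h1, if_pos h2]
        ring

-- the run/counts loop: each slot idx ends up holding F idx
theorem pv_runLoop (diff : List Int) (F : Int → Int) :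
    ∀ (ps : List (Int × Int)) (k : Nat) (cs : List Int) (r0 : Int),
    (∀ (j : Nat), j < ps.length → r0 + pvW diff k (j + 1) = F ((ps.getD j (0, 0)).1)) →
    (∀ p ∈ ps, 0 ≤ p.1 ∧ p.1 < (cs.length : Int)) →
    ∀ (i : Nat), i < cs.length →
    (((PySem.List.enumerate ps (k : Int)).foldl (pvRunStep diff) (cs, r0)).1).getD i 0
      = if (i : Int) ∈ ps.map Prod.fst then F i else cs.getD i 0 := by
  intro ps
  induction ps with
  | nil => intro k cs r0 _ _ i hi; simp [PySem.List.enumerate_nil]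
  | cons p ps ih =>
    intro k cs r0 hval hidx i hi
    rw [PySem.List.enumerate_cons, List.foldl_cons]
    have hp := hidx p (by simp)
    have hrun : r0 + diff.getD k 0 = F p.1 := by
      have h0 := hval 0 (by simp)
      simp only [pvW, List.getD_cons_zero] at h0
      rw [pvW_succ] at h0
      simpa using h0
    have hstep : pvRunStep diff (cs, r0) ((k : Int), p)
        = (cs.set p.1.toNat (r0 + diff.getD k 0), r0 + diff.getD k 0) := by
      simp [pvRunStep]
    rw [hstep]
    have hcast : ((k : Int) + 1) = ((k + 1 : Nat) : Int) := by push_cast; ring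
    rw [hcast]
    have hlen' : (cs.set p.1.toNat (r0 + diff.getD k 0)).length = cs.length := by simp
    rw [ih (k + 1) _ _ (by
        intro j hj
        have h1 := hval (j + 1) (by simp; omega)
        simp only [pvW, List.getD_cons_succ] at h1 ⊢
        rw [pvW_succ] at h1
        linarith)
      (by intro q hq; rw [hlen']; exact hidx q (by simp [hq]))
      i (by rw [hlen']; exact hi)]
    by_cases hmem : (i : Int) ∈ ps.map Prod.fst
    · simp [hmem]
    · by_cases heq : (i : Int) = p.1
      · have htn : p.1.toNat = i := by omega
        rw [if_neg hmem, if_pos (by simp [heq.symm])]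
        rw [htn, List.getD_eq_getElem _ _ (by simpa using hi), List.getElem_set_self]
        rw [hrun, heq]
      · have hne : p.1.toNat ≠ i := by omega
        rw [if_neg hmem, if_neg (by simp [heq, hmem])]
        rw [List.getD_eq_getElem?_getD, List.getElem?_set_ne hne, ← List.getD_eq_getElem?_getD]

theorem pv_runLoop_length (diff : List Int) (ps : List (Int × Int)) :
    ∀ (k : Int) (cs : List Int) (r0 : Int),
    (((PySem.List.enumerate ps k).foldl (pvRunStep diff) (cs, r0)).1).length = cs.length := by
  induction ps with
  | nil => intro k cs r0; simp [PySem.List.enumerate_nil]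
  | cons p ps ih =>
    intro k cs r0
    rw [PySem.List.enumerate_cons, List.foldl_cons]
    show (((PySem.List.enumerate ps (k + 1)).foldl (pvRunStep diff)
      (cs.set p.1.toNat _, _)).1).length = cs.length
    rw [ih]
    simp

-- B's counts list equals levels.map (pvBarCnt bars)
theorem pv_B_counts (z : List (Int × Int)) (ls : List Int) :
    (((PySem.List.enumerate (PySem.List.sorted (PySem.List.enumerate ls 0) (fun p => p.2) false) 0).foldl
        (pvRunStep ((z.foldl (pvAltStep ((PySem.List.sorted (PySem.List.enumerate ls 0) (fun p => p.2) false).map (fun p => p.2)))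
          (List.replicate (ls.length + 1) 0))))
        (List.replicate ls.length 0, 0)).1)
      = ls.map (pvBarCnt z) := by
  have hperm := PySem.List.sorted_perm (PySem.List.enumerate ls 0) (fun p : Int × Int => p.2) false
  set P := PySem.List.sorted (PySem.List.enumerate ls 0) (fun p : Int × Int => p.2) false with hP
  set K := P.map (fun p : Int × Int => p.2) with hK
  have hlenP : P.length = ls.length := by
    rw [hperm.length_eq, PySem.List.length_enumerate]
  have hKlen : K.length = ls.length := by rw [hK, List.length_map, hlenP]
  have hsorted : K.Pairwise (· ≤ ·) := by
    rw [hK, List.pairwise_map]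
    exact PySem.List.sorted_pairwise (PySem.List.enumerate ls 0) (fun p : Int × Int => p.2)
  set D := z.foldl (pvAltStep K) (List.replicate (ls.length + 1) 0) with hD
  have hDlen : D.length = ls.length + 1 := by
    rw [hD, pv_diff_len, List.length_replicate]
  have hrepr : ∀ q ∈ P, ∃ kk : Nat, kk < ls.length ∧ q.1 = (kk : Int) ∧ q.2 = ls.getD kk 0 := by
    intro q hq
    obtain ⟨kk, hkk, hqe⟩ := (PySem.List.mem_enumerate_iff ls 0 q).mp (hperm.subset hq)
    exact ⟨kk, hkk, by rw [hqe]; simp, by rw [hqe]; exact (List.getD_eq_getElem _ _ hkk).symm⟩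
  have hval : ∀ (j : Nat), j < P.length →
      (0 : Int) + pvW D 0 (j + 1) = pvBarCnt z (ls.getD ((P.getD j (0, 0)).1).toNat 0) := by
    intro j hj
    have hjK : j < K.length := by omega
    have hsum := pv_diff_sum K hsorted z (List.replicate (ls.length + 1) 0)
      (by rw [List.length_replicate]; omega) j (by simpa using hjK)
    have hW : pvW D 0 (j + 1) = (D.take (j + 1)).sum := by rw [pvW, List.drop_zero]
    have hz : ((List.replicate (ls.length + 1) (0 : Int)).take (j + 1)).sum = 0 := by
      rw [List.take_replicate]; simp
    have hKj : K.getD j 0 = (P.getD j (0, 0)).2 := by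
      rw [hK, List.getD_eq_getElem _ _ (by simp only [List.length_map]; omega), List.getElem_map,
        List.getD_eq_getElem _ _ (by omega : j < P.length)]
    have hmemP : P.getD j (0, 0) ∈ P := by
      rw [List.getD_eq_getElem _ _ (by omega : j < P.length)]
      exact List.getElem_mem _
    obtain ⟨kk, hkk, h1, h2⟩ := hrepr _ hmemP
    rw [← hD] at hsum
    rw [hW, hsum, hz, hKj, h1, h2, Int.toNat_natCast]
    ring
  have hidx : ∀ q ∈ P, 0 ≤ q.1 ∧ q.1 < ((List.replicate ls.length (0 : Int)).length : Int) := by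
    intro q hq
    obtain ⟨kk, hkk, h1, _⟩ := hrepr q hq
    rw [List.length_replicate, h1]
    exact ⟨by positivity, by exact_mod_cast hkk⟩
  have hrl := pv_runLoop D (fun idx => pvBarCnt z (ls.getD idx.toNat 0)) P 0
      (List.replicate ls.length 0) 0 hval hidx
  simp only [Nat.cast_zero] at hrl
  apply List.ext_getElem
  · rw [pv_runLoop_length, List.length_replicate, List.length_map]
  · intro i h1 h2
    have him : i < ls.length := by
      rw [List.length_map] at h2; exact h2
    have hgd := hrl i (by rw [List.length_replicate]; exact him)
    have hmem : (i : Int) ∈ P.map Prod.fst := by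
      have hpm : (P.map Prod.fst).Perm ((PySem.List.enumerate ls 0).map Prod.fst) := hperm.map _
      rw [hpm.mem_iff, PySem.List.map_fst_enumerate ls 0, PySem.List.mem_pyRange_one]
      exact ⟨by positivity, by omega⟩
    rw [if_pos hmem] at hgd
    rw [← List.getD_eq_getElem _ 0 h1, hgd, List.getElem_map, Int.toNat_natCast,
      List.getD_eq_getElem _ _ him]

-- ===== VERDICT (by name: the statement is the Claim_ definition above) =====
theorem mostDataOnLevel_spec : Claim_equal_mostDataOnLevel := by
  unfold Claim_equal_mostDataOnLevel
  intro op cl levels _ _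
  unfold Spec_mostDataOnLevel
  simp only [mostDataOnLevel, mostDataOnLevel_alt]
  rw [pv_A_counts (op.zip cl) levels, pv_B_counts (op.zip cl) levels]
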